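-- pv_equiv track=rewrite | github.com/sfmalloy/everybody-codes | events/2024/quest06/p2.py | solve
-- ===== SOURCE A (Python) =====
-- from collections import deque, defaultdict
--
-- def solve(tree: dict[str, list[str]]):
--     q = deque([('RR', [])])
--     paths = defaultdict(list)
--     while len(q) > 0:
--         key, path = q.popleft()
--         if key == '@':
--             path.append('@')
--             paths[len(path)].append(path)
--             continue
--         if key in tree:
--             for v in tree[key]:
--                 q.append((v, path+[key]))
--     for v in paths.values():
--         if len(v) == 1:
--             return ''.join([p[0] for p in v[0]])
-- ===== SOURCE B (Python) =====
-- from collections import deque, defaultdict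
--
--
-- def solve(tree: dict[str, list[str]]):
--     # BFS over back-pointer records (key, parent-index, depth) instead of
--     # copying the whole path at every step; only the winning path is rebuilt.
--     keys = ['RR']
--     parents = [-1]
--     depths = [0]
--     q = deque([0])
--     by_len = defaultdict(list)
--     while len(q) > 0:
--         i = q.popleft()
--         k = keys[i]
--         if k == '@':
--             by_len[depths[i] + 1].append(i)
--             continue
--         if k in tree:
--             for v in tree[k]:
--                 keys.append(v)
--                 parents.append(i)
--                 depths.append(depths[i] + 1)
--                 q.append(len(keys) - 1)
--     for idxs in by_len.values():
--         if len(idxs) == 1: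
--             out = []
--             j = idxs[0]
--             while j != -1:
--                 out.append(keys[j][0])
--                 j = parents[j]
--             return ''.join(reversed(out))
-- ===== Notes on version B (the rewrite author's own statement) =====
-- stated objective: alternative
-- what changed: A copies the whole ancestor path into every queue entry and stores full path lists per length; B runs the same BFS over back-pointer records (key, parent index, depth), groups '@'-arrivals per depth by record index only, and reconstructs only the unique-length path at the end - it trades A's per-step path copies for one final reconstruction walk. …
-- outside the precondition, e.g. on solve({'RR': ['', '@'], '': ['@']}): A returns 'R@', B returns 'R@'; on solve({'RR': [''], '': ['@']}): A raises IndexError, B raises IndexError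
import Mathlib
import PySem

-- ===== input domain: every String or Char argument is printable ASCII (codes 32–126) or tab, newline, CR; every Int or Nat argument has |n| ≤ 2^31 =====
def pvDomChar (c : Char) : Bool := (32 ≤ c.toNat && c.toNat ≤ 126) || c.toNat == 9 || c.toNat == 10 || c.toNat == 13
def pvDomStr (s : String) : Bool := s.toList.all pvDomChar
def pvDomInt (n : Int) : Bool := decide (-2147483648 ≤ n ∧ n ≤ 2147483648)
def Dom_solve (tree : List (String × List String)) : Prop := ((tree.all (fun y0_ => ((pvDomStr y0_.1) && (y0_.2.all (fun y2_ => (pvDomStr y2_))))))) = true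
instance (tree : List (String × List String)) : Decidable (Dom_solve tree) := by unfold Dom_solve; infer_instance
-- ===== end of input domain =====

-- B replaces A's per-step copying of whole paths by BFS records with back-pointers
-- (key, parent index, depth), rebuilding only the returned path (objective:
-- alternative — same measured cost on the sampled input family).
-- Both loops pop one queue element per step; the shared fuel bounds the number of
-- pops (it is never exhausted on Pre_-inputs of practical size; on equal fuel the
-- two loops run in lockstep, which is what the equivalence proof uses).

-- ===== PORT A =====
def pvFuel (tree : List (String × List String)) : Nat :=
  (tree.foldl (fun a p => a + p.2.length) 2 + tree.length) ^ (tree.length + 2)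

-- p[0] for a string p: a 1-char string, modelled as its character. Pre_ keeps all
-- node names nonempty, so the default is never hit on admitted inputs.
def headInit (s : String) : Char := s.toList.headD ' '

def solveLoopA (tree : List (String × List String)) :
    Nat → List (String × List String) → PySem.Dict Int (List (List String)) →
    PySem.Dict Int (List (List String))
  | 0, _, d => d
  | _ + 1, [], d => d
  | fuel + 1, (key, path) :: q, d =>
    if key = "@" then
      let np := path ++ ["@"]
      solveLoopA tree fuel q (d.modify ((np.length : Int)) [] (fun v => v ++ [np]))
    else
      match List.lookup key tree with
      | some vs => solveLoopA tree fuel (q ++ vs.map (fun v => (v, path ++ [key]))) d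
      | none => solveLoopA tree fuel q d

def firstUniqueA : List (List (List String)) → Option String
  | [] => none
  | v :: rest =>
    if v.length = 1 then some (String.ofList ((v.headD []).map headInit))
    else firstUniqueA rest

def solve (tree : List (String × List String)) : Option String :=
  firstUniqueA (solveLoopA tree (pvFuel tree) [("RR", [])] (PySem.Dict.mk [])).values

-- ===== PORT B =====
-- state: records (key, parent index as Int with -1 for the root, depth), queue of
-- record indices, dict length ↦ indices of '@'-records.
def solveLoopB (tree : List (String × List String)) :
    Nat → List (String × Int × Int) → List Nat → PySem.Dict Int (List Nat) →
    List (String × Int × Int) × PySem.Dict Int (List Nat)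
  | 0, recs, _, d => (recs, d)
  | _ + 1, recs, [], d => (recs, d)
  | fuel + 1, recs, i :: q, d =>
    let r := recs.getD i ("", -1, 0)
    if r.1 = "@" then
      solveLoopB tree fuel recs q (d.modify (r.2.2 + 1) [] (fun v => v ++ [i]))
    else
      match List.lookup r.1 tree with
      | some vs =>
        let st := vs.foldl
          (fun (p : List (String × Int × Int) × List Nat) v =>
            (p.1 ++ [(v, (i : Int), r.2.2 + 1)], p.2 ++ [p.1.length])) (recs, q)
        solveLoopB tree fuel st.1 st.2 d
      | none => solveLoopB tree fuel recs q d

-- the `while j != -1` reconstruction loop of B (collects initials bottom-up)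
def rebuildB (recs : List (String × Int × Int)) : Nat → Int → List Char → List Char
  | 0, _, out => out
  | fuel + 1, j, out =>
    if j = -1 then out
    else
      let r := recs.getD j.toNat ("", -1, 0)
      rebuildB recs fuel r.2.1 (out ++ [headInit r.1])

def firstUniqueB (recs : List (String × Int × Int)) : List (List Nat) → Option String
  | [] => none
  | v :: rest =>
    if v.length = 1 then
      some (String.ofList ((rebuildB recs (recs.length + 1) ((v.headD 0 : Nat) : Int) []).reverse))
    else firstUniqueB recs rest

def solve_alt (tree : List (String × List String)) : Option String :=
  let st := solveLoopB tree (pvFuel tree) [("RR", -1, 0)] [0] (PySem.Dict.mk [])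
  firstUniqueB st.1 st.2.values

-- ===== PRECONDITION & SPEC =====
-- adjacency of the graph: first-match lookup, '@' is never expanded
def pvChildren (tree : List (String × List String)) (k : String) : List String :=
  if k = "@" then [] else (List.lookup k tree).getD []

def pvReach (tree : List (String × List String)) : Nat → List String → List String
  | 0, s => s
  | n + 1, s => pvReach tree n (PySem.Set.update s (s.flatMap (pvChildren tree)))

def pvReachFuel (tree : List (String × List String)) : Nat :=
  tree.foldl (fun a p => a + p.2.length) 1

-- Pre_ excludes only inputs on which a Python may fail to return a value of the
-- type: (a) trees where the degenerate empty node name '' lies on some RR→'@'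
-- path — there ''[0] raises IndexError in BOTH Pythons alike (A joins p[0] over
-- the selected path, B takes keys[j][0] along the same path), whenever that path's
-- length is the first unique one; whether that happens depends on which length is
-- unique, so this clause slightly over-approximates the raise region (see cites:
-- on the over-approximated part A and B return the SAME value, nothing of A is
-- hidden) — and (b) trees with a cycle reachable from 'RR', on which A's BFS
-- queue never empties and A never returns.
def Pre_solve (tree : List (String × List String)) : Prop :=
  (("" ∉ pvReach tree (pvReachFuel tree) ["RR"]) ∨
    ("@" ∉ pvReach tree (pvReachFuel tree) (pvChildren tree ""))) ∧
  (∀ k ∈ pvReach tree (pvReachFuel tree) ["RR"],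
    k ∉ pvReach tree (pvReachFuel tree) (pvChildren tree k))

instance (tree : List (String × List String)) : Decidable (Pre_solve tree) := by
  unfold Pre_solve; infer_instance

def pvWitness_solve : (List (String × List String)) :=
  [("RR", ["A", "@"]), ("A", ["@"])]

def Spec_solve (tree : List (String × List String)) (out : Option String) : Prop := out = solve_alt tree
instance (tree : List (String × List String)) (out : Option String) : Decidable (Spec_solve tree out) := by unfold Spec_solve; infer_instance

-- ===== CLAIM (what is proved, stated in full; the proofs are below) =====
def Claim_equal_solve : Prop := ∀ (tree : List (String × List String)), Dom_solve tree → Pre_solve tree → Spec_solve tree (solve tree)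

-- ===== LEMMAS AND PROOFS =====

-- inclusive ancestor chain of record j (keys from the root down to j); fueled
def ancB (recs : List (String × Int × Int)) : Nat → Int → List String
  | 0, _ => []
  | fuel + 1, j =>
    if j < 0 then []
    else
      match recs[j.toNat]? with
      | none => []
      | some r => ancB recs fuel r.2.1 ++ [r.1]

-- well-formed record lists: parents point strictly backwards, depths are consistent
def WFrecs (recs : List (String × Int × Int)) : Prop :=
  ∀ idx, (h : idx < recs.length) →
    (recs[idx].2.1 = -1 ∧ recs[idx].2.2 = 0) ∨
    (0 ≤ recs[idx].2.1 ∧ recs[idx].2.1.toNat < idx ∧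
      recs[idx].2.2 = (recs.getD recs[idx].2.1.toNat ("", -1, 0)).2.2 + 1)

def decQ (recs : List (String × Int × Int)) (i : Nat) : String × List String :=
  ((recs.getD i ("", -1, 0)).1, ancB recs recs.length (recs.getD i ("", -1, 0)).2.1)

def mapD (recs : List (String × Int × Int)) (d : PySem.Dict Int (List Nat)) :
    PySem.Dict Int (List (List String)) :=
  PySem.Dict.mk (d.items.map (fun p => (p.1, p.2.map (fun i : Nat => ancB recs recs.length ((i : Int))))))

lemma ancB_neg (recs : List (String × Int × Int)) (F : Nat) (j : Int) (hj : j < 0) :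
    ancB recs F j = [] := by
  cases F <;> simp [ancB, hj]

lemma ancB_succ (recs : List (String × Int × Int)) (F : Nat) (j : Int) (h0 : ¬ j < 0)
    (h : j.toNat < recs.length) :
    ancB recs (F + 1) j = ancB recs F (recs[j.toNat]'h).2.1 ++ [(recs[j.toNat]'h).1] := by
  simp [ancB, h0, List.getElem?_eq_getElem h]

lemma ancB_stable (recs ext : List (String × Int × Int)) (hwf : WFrecs recs) :
    ∀ n (j : Int) (F F' : Nat), j.toNat < n → j < (recs.length : Int) →
      j.toNat < F → j.toNat < F' →
      ancB (recs ++ ext) F j = ancB recs F' j := by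
  intro n
  induction n with
  | zero => intro j F F' hn _ _ _; exact absurd hn (by omega)
  | succ n ih =>
    intro j F F' hn hlt hF hF'
    by_cases hneg : j < 0
    · rw [ancB_neg _ _ _ hneg, ancB_neg _ _ _ hneg]
    · have hj : j.toNat < recs.length := by omega
      have hja : j.toNat < (recs ++ ext).length := by simp; omega
      obtain ⟨F, rfl⟩ : ∃ m, F = m + 1 := ⟨F - 1, by omega⟩
      obtain ⟨F', rfl⟩ : ∃ m, F' = m + 1 := ⟨F' - 1, by omega⟩
      rw [ancB_succ _ _ _ hneg hja, ancB_succ _ _ _ hneg hj]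
      have he : (recs ++ ext)[j.toNat]'hja = recs[j.toNat]'hj :=
        List.getElem_append_left hj
      rw [he]
      rcases hwf j.toNat hj with ⟨hp, _⟩ | ⟨hp0, hplt, _⟩
      · rw [hp, ancB_neg _ _ _ (by norm_num), ancB_neg _ _ _ (by norm_num)]
      · congr 1
        exact ih _ _ _ (by omega) (by omega) (by omega) (by omega)

lemma ancB_fuel (recs : List (String × Int × Int)) (hwf : WFrecs recs)
    (j : Int) (F F' : Nat) (hlt : j < (recs.length : Int))
    (hF : j.toNat < F) (hF' : j.toNat < F') :
    ancB recs F j = ancB recs F' j := by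
  have := ancB_stable recs [] hwf (j.toNat + 1) j F F' (by omega) hlt hF hF'
  simpa using this

lemma ancB_len (recs : List (String × Int × Int)) (hwf : WFrecs recs) :
    ∀ n (j : Int), j.toNat < n → 0 ≤ j → j < (recs.length : Int) →
      ((ancB recs recs.length j).length : Int) = (recs.getD j.toNat ("", -1, 0)).2.2 + 1 := by
  intro n
  induction n with
  | zero => intro j hn _ _; exact absurd hn (by omega)
  | succ n ih =>
    intro j hn h0 hlt
    have hneg : ¬ j < 0 := by omega
    have hj : j.toNat < recs.length := by omega
    obtain ⟨m, hm⟩ : ∃ m, recs.length = m + 1 := ⟨recs.length - 1, by omega⟩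
    rw [hm, ancB_succ _ _ _ hneg (hm ▸ hj)]
    rw [List.getD_eq_getElem _ _ hj]
    rcases hwf j.toNat hj with ⟨hp, hd⟩ | ⟨hp0, hplt, hd⟩
    · rw [hp, ancB_neg _ _ _ (by norm_num), hd]; simp
    · set p := (recs[j.toNat]'hj).2.1 with hpdef
      have hplen : ancB recs m p = ancB recs recs.length p :=
        ancB_fuel recs hwf p m recs.length (by omega) (by omega) (by omega)
      rw [hplen]
      have := ih p (by omega) hp0 (by omega)
      simp only [List.length_append, List.length_cons, List.length_nil]
      rw [hd]
      push_cast
      omega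

lemma rebuildB_neg (recs : List (String × Int × Int)) (F : Nat) (out : List Char) :
    rebuildB recs F (-1) out = out := by
  cases F <;> simp [rebuildB]

lemma rebuildB_eq (recs : List (String × Int × Int)) (hwf : WFrecs recs) :
    ∀ n (j : Int) (out : List Char) (F : Nat), j.toNat < n → -1 ≤ j → j < (recs.length : Int) →
      j.toNat < F →
      rebuildB recs F j out = out ++ ((ancB recs recs.length j).map headInit).reverse := by
  intro n
  induction n with
  | zero => intro j out F hn _ _ _; exact absurd hn (by omega)
  | succ n ih =>
    intro j out F hn hm1 hlt hF
    obtain ⟨F, rfl⟩ : ∃ m, F = m + 1 := ⟨F - 1, by omega⟩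
    by_cases hneg : j = -1
    · subst hneg
      rw [ancB_neg _ _ _ (by norm_num)]
      simp [rebuildB]
    · have h0 : 0 ≤ j := by omega
      have hj : j.toNat < recs.length := by omega
      obtain ⟨m, hm⟩ : ∃ m, recs.length = m + 1 := ⟨recs.length - 1, by omega⟩
      rw [rebuildB]
      rw [if_neg hneg]
      rw [List.getD_eq_getElem _ _ hj]
      conv_rhs => rw [hm, ancB_succ _ _ _ (by omega) (hm ▸ hj)]
      have hstep : ancB recs m (recs[j.toNat]'hj).2.1 = ancB recs recs.length (recs[j.toNat]'hj).2.1 := by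
        rcases hwf j.toNat hj with ⟨hp, _⟩ | ⟨hp0, hplt, _⟩
        · rw [hp, ancB_neg _ _ _ (by norm_num), ancB_neg _ _ _ (by norm_num)]
        · exact ancB_fuel recs hwf _ m recs.length (by omega) (by omega) (by omega)
      rw [hstep]
      rcases hwf j.toNat hj with ⟨hp, _⟩ | ⟨hp0, hplt, _⟩
      · simp only []
        rw [hp, rebuildB_neg, ancB_neg _ _ _ (by norm_num)]
        simp
      · rw [ih _ _ _ (by omega) (by omega) (by omega) (by omega)]
        simp

lemma firstUnique_rel (recs : List (String × Int × Int)) (hwf : WFrecs recs) :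
    ∀ vals : List (List Nat), (∀ v ∈ vals, ∀ i ∈ v, i < recs.length) →
      firstUniqueA (vals.map (List.map (fun i : Nat => ancB recs recs.length ((i : Int))))) =
        firstUniqueB recs vals := by
  intro vals
  induction vals with
  | nil => intro _; rfl
  | cons v rest ih =>
    intro hb
    rw [List.map_cons, firstUniqueA, firstUniqueB]
    by_cases h1 : v.length = 1
    · rw [if_pos (by simpa using h1), if_pos h1]
      obtain ⟨i, rfl⟩ := List.length_eq_one_iff.mp h1
      have hi : i < recs.length := hb [i] (by simp) i (by simp)
      have hr := rebuildB_eq recs hwf (i + 1) (i : Int) [] (recs.length + 1)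
        (by omega) (by omega) (by omega) (by omega)
      simp only [List.headD_cons, List.map_cons]
      rw [hr]
      simp
    · rw [if_neg (by simpa using h1), if_neg h1]
      exact ih (fun w hw => hb w (by simp [hw]))

lemma mapD_get? (recs : List (String × Int × Int)) (d : PySem.Dict Int (List Nat)) (L : Int) :
    (mapD recs d).get? L
      = (d.get? L).map (List.map (fun i : Nat => ancB recs recs.length ((i : Int)))) := by
  simp only [mapD, PySem.Dict.get?, List.find?_map]
  have hpred : ((fun p : Int × List (List String) => p.1 == L) ∘
      (fun p : Int × List Nat => (p.1, p.2.map (fun i : Nat => ancB recs recs.length ((i : Int))))))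
      = fun p : Int × List Nat => p.1 == L := rfl
  rw [hpred]
  cases PySem.Dict.items d |>.find? (fun p => p.1 == L) <;> rfl

lemma mapD_contains (recs : List (String × Int × Int)) (d : PySem.Dict Int (List Nat)) (L : Int) :
    (mapD recs d).contains L = d.contains L := by
  rw [PySem.Dict.contains_eq_isSome_get?, PySem.Dict.contains_eq_isSome_get?, mapD_get?]
  cases d.get? L <;> rfl

lemma mapD_getD_nil (recs : List (String × Int × Int)) (d : PySem.Dict Int (List Nat)) (L : Int) :
    (mapD recs d).getD L []
      = (d.getD L []).map (fun i : Nat => ancB recs recs.length ((i : Int))) := by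
  simp only [PySem.Dict.getD, mapD_get?]
  cases d.get? L <;> rfl

lemma mapD_insert (recs : List (String × Int × Int)) (d : PySem.Dict Int (List Nat)) (L : Int)
    (v : List Nat) :
    mapD recs (d.insert L v)
      = (mapD recs d).insert L (v.map (fun i : Nat => ancB recs recs.length ((i : Int)))) := by
  simp only [PySem.Dict.insert, mapD_contains]
  by_cases hc : d.contains L = true
  · simp only [hc, if_pos, mapD, List.map_map]
    congr 1
    apply List.map_congr_left
    intro p _
    by_cases hpk : p.1 = L <;> simp [hpk]
  · simp only [hc, if_neg, Bool.false_eq_true, not_false_iff, mapD, List.map_append]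
    rfl

lemma mapD_modify (recs : List (String × Int × Int)) (d : PySem.Dict Int (List Nat)) (L : Int)
    (i : Nat) :
    mapD recs (d.modify L [] (fun v => v ++ [i]))
      = (mapD recs d).modify L [] (fun v => v ++ [ancB recs recs.length ((i : Int))]) := by
  simp only [PySem.Dict.modify, mapD_insert, mapD_getD_nil, List.map_append, List.map_cons,
    List.map_nil]

lemma getD_elem_values (d : PySem.Dict Int (List Nat)) (L : Int) (x : Nat)
    (hx : x ∈ d.getD L []) : ∃ v ∈ d.values, x ∈ v := by
  cases hg : d.get? L with
  | none => simp [PySem.Dict.getD, hg] at hx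
  | some u =>
    have hu : u ∈ d.values := by
      have := PySem.Dict.mem_items_of_get?_eq_some d hg
      simp only [PySem.Dict.values]
      exact List.mem_map.mpr ⟨(L, u), this, rfl⟩
    refine ⟨u, hu, ?_⟩
    simpa [PySem.Dict.getD, hg] using hx

lemma values_modify_bound (d : PySem.Dict Int (List Nat)) (L : Int) (i : Nat) (P : Nat → Prop)
    (hb : ∀ v ∈ d.values, ∀ x ∈ v, P x) (hi : P i) :
    ∀ v ∈ (d.modify L [] (fun v => v ++ [i])).values, ∀ x ∈ v, P x := by
  intro v hv x hx
  rw [PySem.Dict.modify] at hv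
  rcases PySem.Dict.mem_values_insert d L _ _ hv with rfl | hv'
  · rcases List.mem_append.mp hx with hx' | hx'
    · obtain ⟨u, hu, hxu⟩ := getD_elem_values d L x hx'
      exact hb u hu x hxu
    · simp only [List.mem_singleton] at hx'
      exact hx' ▸ hi
  · exact hb v hv' x hx

lemma mapD_stable (recs ext : List (String × Int × Int)) (d : PySem.Dict Int (List Nat))
    (hwf : WFrecs recs) (hb : ∀ v ∈ d.values, ∀ i ∈ v, i < recs.length) :
    mapD (recs ++ ext) d = mapD recs d := by
  unfold mapD
  congr 1
  apply List.map_congr_left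
  intro p hp
  congr 1
  apply List.map_congr_left
  intro i hi
  have hlt : i < recs.length := by
    refine hb p.2 ?_ i hi
    simp only [PySem.Dict.values]
    exact List.mem_map.mpr ⟨p, hp, rfl⟩
  exact ancB_stable recs ext hwf (i + 1) (i : Int) (recs ++ ext).length recs.length
    (by omega) (by exact_mod_cast hlt) (by simp; omega) (by simpa using hlt)

lemma foldl_children (pi dp : Int) :
    ∀ (vs : List String) (recs : List (String × Int × Int)) (q : List Nat),
      vs.foldl (fun (p : List (String × Int × Int) × List Nat) v =>
          (p.1 ++ [(v, pi, dp)], p.2 ++ [p.1.length])) (recs, q)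
        = (recs ++ vs.map (fun v => (v, pi, dp)),
           q ++ (List.range vs.length).map (fun j => recs.length + j)) := by
  intro vs
  induction vs with
  | nil => intro recs q; simp
  | cons v vs ih =>
    intro recs q
    rw [List.foldl_cons, ih]
    rw [Prod.mk.injEq]
    refine ⟨by simp, ?_⟩
    simp only [List.length_cons, List.range_succ_eq_map, List.map_cons, List.map_map,
      List.length_append, List.length_nil, List.append_assoc, List.singleton_append]
    apply congrArg (fun t => q ++ t)
    refine List.cons_eq_cons.mpr ⟨by omega, ?_⟩
    apply List.map_congr_left
    intro j _
    simp only [Function.comp_apply]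
    omega

lemma WF_append (recs : List (String × Int × Int)) (vs : List String) (pi dp : Int)
    (hwf : WFrecs recs) (hpi0 : 0 ≤ pi) (hpilt : pi.toNat < recs.length)
    (hdp : dp = (recs.getD pi.toNat ("", -1, 0)).2.2 + 1) :
    WFrecs (recs ++ vs.map (fun v => (v, pi, dp))) := by
  intro idx h
  by_cases hlt : idx < recs.length
  · have he : (recs ++ vs.map (fun v => (v, pi, dp)))[idx]'h = recs[idx]'hlt :=
      List.getElem_append_left hlt
    rw [he]
    rcases hwf idx hlt with hl | ⟨h0, hp, hd⟩
    · exact Or.inl hl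
    · refine Or.inr ⟨h0, hp, ?_⟩
      have hpl : (recs[idx]'hlt).2.1.toNat < recs.length := by omega
      have hg : ((recs ++ vs.map (fun v => (v, pi, dp))).getD (recs[idx]'hlt).2.1.toNat ("", -1, 0))
          = recs[(recs[idx]'hlt).2.1.toNat]'hpl := by
        rw [List.getD_eq_getElem _ _ (by simp; omega :
          (recs[idx]'hlt).2.1.toNat < (recs ++ vs.map (fun v => (v, pi, dp))).length)]
        exact List.getElem_append_left hpl
      rw [hg, ← List.getD_eq_getElem _ _ hpl]
      exact hd
  · have hlen : idx - recs.length < (vs.map (fun v => (v, pi, dp))).length := by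
      simp at h ⊢; omega
    have he : (recs ++ vs.map (fun v => (v, pi, dp)))[idx]'h
        = (vs.map (fun v => (v, pi, dp)))[idx - recs.length]'hlen := by
      rw [List.getElem_append_right (by omega)]
    rw [he]
    simp only [List.getElem_map]
    refine Or.inr ⟨hpi0, by omega, ?_⟩
    have hg : ((recs ++ vs.map (fun v => (v, pi, dp))).getD pi.toNat ("", -1, 0))
        = recs[pi.toNat]'hpilt := by
      rw [List.getD_eq_getElem _ _ (by simp; omega :
        pi.toNat < (recs ++ vs.map (fun v => (v, pi, dp))).length)]
      exact List.getElem_append_left hpilt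
    rw [hg, hdp, List.getD_eq_getElem _ _ hpilt]

lemma bisim (tree : List (String × List String)) :
    ∀ fuel (recs : List (String × Int × Int)) (q : List Nat) (d : PySem.Dict Int (List Nat)),
      WFrecs recs →
      (∀ i ∈ q, i < recs.length) →
      (∀ v ∈ d.values, ∀ i ∈ v, i < recs.length) →
      solveLoopA tree fuel (q.map (decQ recs)) (mapD recs d)
          = mapD (solveLoopB tree fuel recs q d).1 (solveLoopB tree fuel recs q d).2
        ∧ WFrecs (solveLoopB tree fuel recs q d).1
        ∧ (∀ v ∈ (solveLoopB tree fuel recs q d).2.values, ∀ i ∈ v,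
            i < (solveLoopB tree fuel recs q d).1.length) := by
  intro fuel
  induction fuel with
  | zero => intro recs q d hwf hq hd; exact ⟨rfl, hwf, hd⟩
  | succ fuel ih =>
    intro recs q d hwf hq hd
    cases q with
    | nil => exact ⟨rfl, hwf, hd⟩
    | cons i rest =>
      have hi : i < recs.length := hq i (by simp)
      have hgetD : recs.getD i ("", -1, 0) = recs[i]'hi := List.getD_eq_getElem _ _ hi
      obtain ⟨m, hm⟩ : ∃ m, recs.length = m + 1 := ⟨recs.length - 1, by omega⟩
      have hrest : ∀ j ∈ rest, j < recs.length := fun j hj => hq j (by simp [hj])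
      -- the inclusive chain of record i
      have hanc_i : ancB recs recs.length ((i : Int))
          = ancB recs recs.length (recs[i]'hi).2.1 ++ [(recs[i]'hi).1] := by
        have hs := ancB_succ recs m ((i : Int)) (by omega) (by simpa using hi)
        rw [hm, hs]
        simp only [Int.toNat_natCast]
        congr 1
        rcases hwf i hi with ⟨hp, _⟩ | ⟨hp0, hplt, _⟩
        · rw [hp, ancB_neg _ _ _ (by norm_num), ancB_neg _ _ _ (by norm_num)]
        · rw [← hm]
          exact ancB_fuel recs hwf _ m recs.length (by omega) (by omega) (by omega)
      have hlen : ((ancB recs recs.length ((i : Int))).length : Int) = (recs[i]'hi).2.2 + 1 := by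
        have := ancB_len recs hwf (i + 1) ((i : Int)) (by omega) (by omega) (by exact_mod_cast hi)
        rwa [Int.toNat_natCast, hgetD] at this
      -- queue decode of the popped element
      have hdec : decQ recs i = ((recs[i]'hi).1, ancB recs recs.length (recs[i]'hi).2.1) := by
        rw [decQ, hgetD]
      rw [List.map_cons, hdec]
      by_cases hk : (recs[i]'hi).1 = "@"
      · -- both store an arrival; records unchanged
        rw [solveLoopA, solveLoopB]
        simp only [hgetD, hk, if_pos]
        have hnp : ancB recs recs.length (recs[i]'hi).2.1 ++ ["@"]
            = ancB recs recs.length ((i : Int)) := by rw [hanc_i, hk]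
        rw [hnp, hlen, ← mapD_modify]
        exact ih recs rest (d.modify ((recs[i]'hi).2.2 + 1) [] (fun v => v ++ [i])) hwf hrest
          (values_modify_bound d _ i (· < recs.length) hd hi)
      · rw [solveLoopA, solveLoopB]
        simp only [hgetD, hk, if_false]
        cases hlook : List.lookup (recs[i]'hi).1 tree with
        | none =>
          simp only []
          exact ih recs rest d hwf hrest hd
        | some vs =>
          simp only []
          rw [foldl_children]
          set ext := vs.map (fun v => (v, (i : Int), (recs[i]'hi).2.2 + 1)) with hext
          have hwf' : WFrecs (recs ++ ext) := by
            refine WF_append recs vs ((i : Int)) ((recs[i]'hi).2.2 + 1) hwf (by omega) ?_ ?_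
            · simpa using hi
            · rw [Int.toNat_natCast, hgetD]
          have hlen' : (recs ++ ext).length = recs.length + vs.length := by
            simp [hext]
          have hq' : ∀ j ∈ rest ++ (List.range vs.length).map (fun j => recs.length + j),
              j < (recs ++ ext).length := by
            intro j hj
            rcases List.mem_append.mp hj with hj | hj
            · have := hrest j hj; omega
            · obtain ⟨j0, hj0, rfl⟩ := List.mem_map.mp hj
              have := List.mem_range.mp hj0
              omega
          have hd' : ∀ v ∈ d.values, ∀ x ∈ v, x < (recs ++ ext).length := by
            intro v hv x hx
            have := hd v hv x hx
            omega
          have happ := ih (recs ++ ext)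
            (rest ++ (List.range vs.length).map (fun j => recs.length + j)) d hwf' hq' hd'
          -- rewrite the A-side queue and dict of the IH into our shape
          have hqmap : (rest ++ (List.range vs.length).map (fun j => recs.length + j)).map
                (decQ (recs ++ ext))
              = rest.map (decQ recs)
                ++ vs.map (fun v => (v, ancB recs recs.length (recs[i]'hi).2.1 ++ [(recs[i]'hi).1])) := by
            rw [List.map_append]
            congr 1
            · apply List.map_congr_left
              intro j hj
              have hjl : j < recs.length := hrest j hj
              have hg' : (recs ++ ext).getD j ("", -1, 0) = recs[j]'hjl := by
                rw [List.getD_eq_getElem _ _ (by omega : j < (recs ++ ext).length)]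
                exact List.getElem_append_left hjl
              rw [decQ, decQ, hg', List.getD_eq_getElem _ _ hjl]
              congr 1
              rcases hwf j hjl with ⟨hp, _⟩ | ⟨hp0, hplt, _⟩
              · rw [hp, ancB_neg _ _ _ (by norm_num), ancB_neg _ _ _ (by norm_num)]
              · exact ancB_stable recs ext hwf (j + 1) _ _ _ (by omega) (by omega)
                  (by omega) (by omega)
            · rw [List.map_map]
              apply List.ext_getElem (by simp)
              intro j h1 h2
              simp only [List.getElem_map, List.getElem_range, Function.comp_apply]
              have hjv : j < vs.length := by rw [List.length_map] at h2; exact h2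
              have hg' : (recs ++ ext).getD (recs.length + j) ("", -1, 0)
                  = (vs[j]'hjv, (i : Int), (recs[i]'hi).2.2 + 1) := by
                rw [List.getD_eq_getElem _ _ (by rw [hlen']; omega : recs.length + j < (recs ++ ext).length)]
                rw [List.getElem_append_right (by omega)]
                simp [hext]
              rw [decQ, hg']
              simp only []
              congr 1
              rw [← hanc_i]
              exact (ancB_stable recs ext hwf (i + 1) ((i : Int)) (recs ++ ext).length
                recs.length (by omega) (by exact_mod_cast hi)
                (by rw [hlen']; simp only [Int.toNat_natCast]; omega)
                (by simpa using hi))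
          have hmd : mapD (recs ++ ext) d = mapD recs d := mapD_stable recs ext d hwf hd
          rw [hqmap, hmd] at happ
          exact happ

lemma mapD_values (recs : List (String × Int × Int)) (d : PySem.Dict Int (List Nat)) :
    (mapD recs d).values
      = d.values.map (List.map (fun i : Nat => ancB recs recs.length ((i : Int)))) := by
  simp [mapD, PySem.Dict.values, List.map_map]

-- ===== VERDICT (by name: the statement is the Claim_ definition above) =====
theorem solve_spec : Claim_equal_solve := by
  intro tree _ hpre
  -- Pre_ delimits where the Pythons return normally; the fueled ports agree on all
  -- of Dom, so the two halves of hpre carry no further weight in the kernel proof.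
  obtain ⟨-, -⟩ := hpre
  unfold Spec_solve solve solve_alt
  have hwf0 : WFrecs [("RR", -1, 0)] := by
    intro idx h
    have h0 : idx = 0 := by simpa using h
    subst h0
    exact Or.inl ⟨rfl, rfl⟩
  obtain ⟨heq, hwfF, hbF⟩ := bisim tree (pvFuel tree) [("RR", -1, 0)] [0] (PySem.Dict.mk [])
    hwf0 (by simp) (by simp [PySem.Dict.values])
  have hq0 : ([0] : List Nat).map (decQ [("RR", -1, 0)]) = [("RR", [])] := rfl
  have hd0 : mapD [("RR", -1, 0)] (PySem.Dict.mk []) = PySem.Dict.mk [] := rfl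
  rw [hq0, hd0] at heq
  rw [heq, mapD_values]
  exact firstUnique_rel _ hwfF _ hbF
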